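-- pv_equiv track=rewrite | github.com/sboris-git/my_experiments | Python/Task3-sprint/task11_20.py | count_alpha_num
-- ===== SOURCE A (Python) =====
-- def count_alpha_num(text):
--     '''Write a program that accepts a sentence and calculate the number of letters and digits.
--
--     Suppose the following input is supplied to the program:
--         hello world! 123
--     Then, the output should be:
--         LETTERS 10
--         DIGITS 3'''
--
--     digits = 0
--     alpha = 0
--
--     for char in text:
--
--         if char.isdigit():
--             digits += 1
--         elif char.isalpha():
--             alpha += 1
--
--     return 'LETTERS {} \nDIGITS {}'.format(alpha, digits)
-- ===== SOURCE B (Python) =====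
-- def count_alpha_num(text):
--     freq = {}
--     for char in text:
--         freq[char] = freq.get(char, 0) + 1
--     alpha = sum(n for c, n in freq.items() if c.isalpha())
--     digits = sum(n for c, n in freq.items() if c.isdigit())
--     return 'LETTERS {} \nDIGITS {}'.format(alpha, digits)
-- ===== Notes on version B (the rewrite author's own statement) =====
-- stated objective: alternative
-- what changed: B builds a character-frequency dictionary in one pass and then obtains each count by summing the frequencies of the distinct characters satisfying the predicate, instead of A's single loop that tests every character with an elif counter pair.
import Mathlib
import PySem

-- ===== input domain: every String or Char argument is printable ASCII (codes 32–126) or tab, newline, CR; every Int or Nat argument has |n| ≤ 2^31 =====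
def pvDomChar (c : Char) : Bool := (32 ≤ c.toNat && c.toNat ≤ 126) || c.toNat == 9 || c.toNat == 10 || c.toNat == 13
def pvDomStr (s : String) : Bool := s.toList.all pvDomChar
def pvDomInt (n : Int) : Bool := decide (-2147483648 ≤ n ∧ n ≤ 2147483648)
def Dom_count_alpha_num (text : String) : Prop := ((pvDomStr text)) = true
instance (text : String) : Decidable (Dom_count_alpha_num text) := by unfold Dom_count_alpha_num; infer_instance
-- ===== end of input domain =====

-- B first builds a per-character frequency dictionary in one pass and then sums the frequencies
-- of the distinct characters satisfying each predicate, instead of A's single loop that tests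
-- every character with an elif chain (objective: alternative — predicates run once per distinct char).


-- ===== PORT A =====
-- loop state: (digits, alpha), updated per char with the same elif order as A
def count_alpha_num (text : String) : String :=
  let st := text.toList.foldl
    (fun (acc : Int × Int) char =>
      if PySem.Chars.isdigit char then (acc.1 + 1, acc.2)
      else if PySem.Chars.isalpha char then (acc.1, acc.2 + 1)
      else acc)
    (0, 0)
  "LETTERS " ++ PySem.Int.toStr st.2 ++ " \nDIGITS " ++ PySem.Int.toStr st.1

-- ===== PORT B =====
-- freq[char] = freq.get(char, 0) + 1 loop, then sums over freq.items() per predicate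
def count_alpha_num_alt (text : String) : String :=
  let freq := text.toList.foldl
    (fun (d : PySem.Dict Char Int) char => d.insert char (d.getD char 0 + 1))
    PySem.Dict.empty
  let alpha : Int := ((freq.items.filter (fun p => PySem.Chars.isalpha p.1)).map (·.2)).sum
  let digits : Int := ((freq.items.filter (fun p => PySem.Chars.isdigit p.1)).map (·.2)).sum
  "LETTERS " ++ PySem.Int.toStr alpha ++ " \nDIGITS " ++ PySem.Int.toStr digits

-- ===== PRECONDITION & SPEC =====
def Spec_count_alpha_num (text : String) (out : String) : Prop := out = count_alpha_num_alt text
instance (text : String) (out : String) : Decidable (Spec_count_alpha_num text out) := by unfold Spec_count_alpha_num; infer_instance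

-- ===== CLAIM (what is proved, stated in full; the proofs are below) =====
def Claim_equal_count_alpha_num : Prop := ∀ (text : String), Dom_count_alpha_num text → Spec_count_alpha_num text (count_alpha_num text)

-- ===== LEMMAS AND PROOFS =====

theorem pv_isdigit_not_isalpha (c : Char) (h : PySem.Chars.isdigit c = true) :
    PySem.Chars.isalpha c = false := by
  simp [PySem.Chars.isdigit, PySem.Chars.isalpha, PySem.Chars.isupper, PySem.Chars.islower,
    Char.le_def, UInt32.le_iff_toNat_le] at *
  omega

-- A's loop computes the two countP's
theorem pv_fold_counts (l : List Char) (d a : Int) :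
    l.foldl
      (fun (acc : Int × Int) char =>
        if PySem.Chars.isdigit char then (acc.1 + 1, acc.2)
        else if PySem.Chars.isalpha char then (acc.1, acc.2 + 1)
        else acc)
      (d, a)
    = (d + (l.countP (fun c => PySem.Chars.isdigit c) : Int),
       a + (l.countP (fun c => PySem.Chars.isalpha c) : Int)) := by
  induction l generalizing d a with
  | nil => simp
  | cons c t ih =>
    by_cases hd : PySem.Chars.isdigit c = true
    · have ha := pv_isdigit_not_isalpha c hd
      simp [List.foldl_cons, hd, ha, ih]
      ring
    · by_cases ha : PySem.Chars.isalpha c = true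
      · simp [List.foldl_cons, hd, ha, ih]
        ring
      · simp [List.foldl_cons, hd, ha, ih]

-- summing counts of the distinct characters satisfying p recovers countP over the whole list
theorem pv_sum_distinct_counts (l : List Char) (p : Char → Bool) :
    (((PySem.Set.ofList l).filter p).map (fun k => (l.count k : Int))).sum = (l.countP p : Int) := by
  have hperm : (PySem.Set.ofList l).Perm l.dedup := by
    apply (List.perm_ext_iff_of_nodup (PySem.Set.nodup_ofList l) l.nodup_dedup).mpr
    intro x; simp [PySem.Set.mem_ofList]
  rw [((hperm.filter p).map (fun k => (l.count k : Int))).sum_eq,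
    ← List.sum_map_count_dedup_filter_eq_countP p l]
  push_cast [Nat.cast_list_sum, List.map_map]
  rfl

-- B's per-predicate item sum equals countP
theorem pv_items_sum (l : List Char) (p : Char → Bool) :
    (((l.foldl (fun (d : PySem.Dict Char Int) char => d.insert char (d.getD char 0 + 1))
        PySem.Dict.empty).items.filter (fun q => p q.1)).map (·.2)).sum
      = (l.countP p : Int) := by
  rw [PySem.Dict.foldl_insert_getD_add_one_eq_counter, PySem.Dict.items_counter,
    List.filter_map, List.map_map]
  exact pv_sum_distinct_counts l p

-- ===== VERDICT (by name: the statement is the Claim_ definition above) =====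
theorem count_alpha_num_spec : Claim_equal_count_alpha_num := by
  intro text _
  unfold Spec_count_alpha_num count_alpha_num count_alpha_num_alt
  simp only [pv_fold_counts, pv_items_sum, zero_add]
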